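-- pv_equiv track=rewrite | github.com/ajmarin/coding | leetcode/03637_trionic_array_i.py | isTrionic
-- ===== SOURCE A (Python) =====
-- from typing import List
--
-- def isTrionic(nums: List[int]) -> bool:
--     N = len(nums)
--     prev = nums[0]
--     p = 1
--     while p < N and nums[p] > prev:
--         prev = nums[p]
--         p += 1
--     q = p
--     p -= 1
--     while q < N and nums[q] < prev:
--         prev = nums[q]
--         q += 1
--     r = q
--     q -= 1
--     while r < N and nums[r] > prev:
--         prev = nums[r]
--         r += 1
--     r -= 1
--     return 0 < p < q < r == N - 1
-- ===== SOURCE B (Python) =====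
-- def isTrionic(nums):
--     # sign of each adjacent difference: +1 up, -1 down, 0 tie
--     signs = []
--     for a, b in zip(nums, nums[1:]):
--         signs.append(1 if b > a else -1 if b < a else 0)
--     # compress into maximal constant runs; trionic iff run keys are exactly [1, -1, 1]
--     runs = []
--     for s in signs:
--         if not runs or runs[-1] != s:
--             runs.append(s)
--     return runs == [1, -1, 1]
-- ===== Notes on version B (the rewrite author's own statement) =====
-- stated objective: alternative
-- what changed: B replaces A's three prev-threaded while loops over indices by building the list of adjacent-difference signs (+1/-1/0) and compressing it into maximal constant runs, accepting exactly the run pattern [1, -1, 1].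
import Mathlib
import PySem

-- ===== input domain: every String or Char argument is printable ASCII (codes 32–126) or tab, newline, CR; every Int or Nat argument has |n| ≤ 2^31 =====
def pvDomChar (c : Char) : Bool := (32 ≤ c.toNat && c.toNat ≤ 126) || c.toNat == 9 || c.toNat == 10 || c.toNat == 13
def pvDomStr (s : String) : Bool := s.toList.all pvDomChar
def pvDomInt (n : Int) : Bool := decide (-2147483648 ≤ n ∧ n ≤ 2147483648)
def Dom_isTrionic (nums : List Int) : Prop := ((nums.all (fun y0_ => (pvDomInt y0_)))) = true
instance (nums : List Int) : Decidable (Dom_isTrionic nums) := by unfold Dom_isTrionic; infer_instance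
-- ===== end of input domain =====

-- B differs from A in decomposition: it builds the list of adjacent-difference signs and
-- compresses it into maximal constant runs, instead of threading prev through three while loops.

-- ===== PORT A =====
-- while p < N and nums[p] > prev: prev = nums[p]; p += 1
def pvWhileGt (nums : List Int) (prev : Int) (p : Nat) : Nat × Int :=
  if h : p < nums.length then
    if nums[p] > prev then pvWhileGt nums nums[p] (p + 1) else (p, prev)
  else (p, prev)
termination_by nums.length - p

-- while q < N and nums[q] < prev: prev = nums[q]; q += 1
def pvWhileLt (nums : List Int) (prev : Int) (q : Nat) : Nat × Int :=
  if h : q < nums.length then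
    if nums[q] < prev then pvWhileLt nums nums[q] (q + 1) else (q, prev)
  else (q, prev)
termination_by nums.length - q

def isTrionic (nums : List Int) : Bool :=
  let N := nums.length
  let prev := nums.headD 0          -- nums[0]; raises on [], excluded by Pre_
  let pp := pvWhileGt nums prev 1
  let q := pp.1
  let p := pp.1 - 1
  let qq := pvWhileLt nums pp.2 q
  let r := qq.1
  let q := qq.1 - 1
  let rr := pvWhileGt nums qq.2 r
  let r := rr.1 - 1
  decide (0 < p ∧ p < q ∧ q < r ∧ r = N - 1)

-- ===== PORT B =====
def pvSgn (a b : Int) : Int := if b > a then 1 else if b < a then -1 else 0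

def isTrionic_alt (nums : List Int) : Bool :=
  let signs := (nums.zip nums.tail).map (fun ab => pvSgn ab.1 ab.2)
  let runs := signs.foldl
    (fun rs s => if rs = [] ∨ rs.getLast? ≠ some s then rs ++ [s] else rs) []
  decide (runs = [1, -1, 1])

-- ===== PRECONDITION & SPEC =====
-- Pre_ excludes exactly the empty list, on which A raises IndexError at nums[0].
def Pre_isTrionic (nums : List Int) : Prop := nums ≠ []
instance (nums : List Int) : Decidable (Pre_isTrionic nums) := by unfold Pre_isTrionic; infer_instance
def pvWitness_isTrionic : List Int := [0, 1, 0, 1]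

def Spec_isTrionic (nums : List Int) (out : Bool) : Prop := out = isTrionic_alt nums
instance (nums : List Int) (out : Bool) : Decidable (Spec_isTrionic nums out) := by unfold Spec_isTrionic; infer_instance

-- ===== CLAIM (what is proved, stated in full; the proofs are below) =====
def Claim_equal_isTrionic : Prop := ∀ (nums : List Int), Dom_isTrionic nums → Pre_isTrionic nums → Spec_isTrionic nums (isTrionic nums)

-- ===== LEMMAS AND PROOFS =====

-- proof-only helper definitions
def consumeUp (prev : Int) : List Int → Nat × Int × List Int
  | [] => (0, prev, [])
  | y :: ys => if y > prev then
      let t := consumeUp y ys; (t.1 + 1, t.2)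
    else (0, prev, y :: ys)

def consumeDown (prev : Int) : List Int → Nat × Int × List Int
  | [] => (0, prev, [])
  | y :: ys => if y < prev then
      let t := consumeDown y ys; (t.1 + 1, t.2)
    else (0, prev, y :: ys)

def signsAux (prev : Int) : List Int → List Int
  | [] => []
  | y :: ys => pvSgn prev y :: signsAux y ys

def rcomp (last : Option Int) : List Int → List Int
  | [] => []
  | s :: ss => if last = some s then rcomp last ss else s :: rcomp (some s) ss



-- consumption length bound and rest characterization
theorem consumeUp_len_le (l : List Int) : ∀ prev, (consumeUp prev l).1 ≤ l.length := by
  induction l with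
  | nil => intro prev; simp [consumeUp]
  | cons y ys ih =>
    intro prev
    by_cases h : y > prev
    · simp [consumeUp, h]; exact ih y
    · simp [consumeUp, h]

theorem consumeDown_len_le (l : List Int) : ∀ prev, (consumeDown prev l).1 ≤ l.length := by
  induction l with
  | nil => intro prev; simp [consumeDown]
  | cons y ys ih =>
    intro prev
    by_cases h : y < prev
    · simp [consumeDown, h]; exact ih y
    · simp [consumeDown, h]

theorem consumeUp_rest (l : List Int) : ∀ prev, (consumeUp prev l).2.2 = l.drop (consumeUp prev l).1 := by
  induction l with
  | nil => intro prev; simp [consumeUp]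
  | cons y ys ih =>
    intro prev
    by_cases h : y > prev
    · simp [consumeUp, h]; exact ih y
    · simp [consumeUp, h]

theorem consumeDown_rest (l : List Int) : ∀ prev, (consumeDown prev l).2.2 = l.drop (consumeDown prev l).1 := by
  induction l with
  | nil => intro prev; simp [consumeDown]
  | cons y ys ih =>
    intro prev
    by_cases h : y < prev
    · simp [consumeDown, h]; exact ih y
    · simp [consumeDown, h]

-- while-loop bridging
theorem whileGt_eq (nums : List Int) (prev : Int) (p : Nat) :
    pvWhileGt nums prev p =
      (p + (consumeUp prev (nums.drop p)).1, (consumeUp prev (nums.drop p)).2.1) := by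
  fun_induction pvWhileGt nums prev p with
  | case1 prev p h hgt ih =>
    rw [List.drop_eq_getElem_cons h]
    simp [consumeUp, hgt, ih]
    omega
  | case2 prev p h hgt =>
    rw [List.drop_eq_getElem_cons h]
    simp [consumeUp, hgt]
  | case3 prev p h =>
    rw [List.drop_of_length_le (by omega)]
    simp [consumeUp]

theorem whileLt_eq (nums : List Int) (prev : Int) (p : Nat) :
    pvWhileLt nums prev p =
      (p + (consumeDown prev (nums.drop p)).1, (consumeDown prev (nums.drop p)).2.1) := by
  fun_induction pvWhileLt nums prev p with
  | case1 prev p h hlt ih =>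
    rw [List.drop_eq_getElem_cons h]
    simp [consumeDown, hlt, ih]
    omega
  | case2 prev p h hlt =>
    rw [List.drop_eq_getElem_cons h]
    simp [consumeDown, hlt]
  | case3 prev p h =>
    rw [List.drop_of_length_le (by omega)]
    simp [consumeDown]

-- signs decomposition along a consumed run
theorem signsAux_up (l : List Int) : ∀ prev, signsAux prev l =
    List.replicate (consumeUp prev l).1 1 ++
      signsAux (consumeUp prev l).2.1 (consumeUp prev l).2.2 := by
  induction l with
  | nil => intro prev; simp [signsAux, consumeUp]
  | cons y ys ih =>
    intro prev
    by_cases h : y > prev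
    · simp only [signsAux, consumeUp, if_pos h]
      rw [ih y]
      simp [pvSgn, h, List.replicate_succ]
    · simp [consumeUp, h]

theorem signsAux_down (l : List Int) : ∀ prev, signsAux prev l =
    List.replicate (consumeDown prev l).1 (-1) ++
      signsAux (consumeDown prev l).2.1 (consumeDown prev l).2.2 := by
  induction l with
  | nil => intro prev; simp [signsAux, consumeDown]
  | cons y ys ih =>
    intro prev
    by_cases h : y < prev
    · simp only [signsAux, consumeDown, if_pos h]
      rw [ih y]
      have hng : ¬ y > prev := by omega
      simp [pvSgn, h, hng, List.replicate_succ]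
    · simp [consumeDown, h]

-- the rest after an up-run does not start with an up step (and dually)
theorem consumeUp_head (l : List Int) : ∀ prev y ys,
    (consumeUp prev l).2.2 = y :: ys → ¬ y > (consumeUp prev l).2.1 := by
  induction l with
  | nil => intro prev y ys h; simp [consumeUp] at h
  | cons z zs ih =>
    intro prev y ys h
    by_cases hz : z > prev
    · simp only [consumeUp, if_pos hz] at h ⊢
      exact ih z y ys h
    · simp only [consumeUp, if_neg hz] at h ⊢
      cases h
      exact hz

theorem consumeDown_head (l : List Int) : ∀ prev y ys,
    (consumeDown prev l).2.2 = y :: ys → ¬ y < (consumeDown prev l).2.1 := by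
  induction l with
  | nil => intro prev y ys h; simp [consumeDown] at h
  | cons z zs ih =>
    intro prev y ys h
    by_cases hz : z < prev
    · simp only [consumeDown, if_pos hz] at h ⊢
      exact ih z y ys h
    · simp only [consumeDown, if_neg hz] at h ⊢
      cases h
      exact hz

-- rcomp lemmas
theorem rcomp_replicate_skip (n : Nat) (k : Int) (s : List Int) :
    rcomp (some k) (List.replicate n k ++ s) = rcomp (some k) s := by
  induction n with
  | zero => simp
  | succ m ih => simp [List.replicate_succ, rcomp, ih]

theorem rcomp_replicate (n : Nat) (hn : 0 < n) (k : Int) (last : Option Int)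
    (hl : last ≠ some k) (s : List Int) :
    rcomp last (List.replicate n k ++ s) = k :: rcomp (some k) s := by
  cases n with
  | zero => omega
  | succ m => simp [List.replicate_succ, rcomp, hl, rcomp_replicate_skip]

theorem rcomp_cons_ne (k y : Int) (t : List Int) (h : y ≠ k) :
    rcomp (some k) (y :: t) = y :: rcomp (some y) t := by
  simp [rcomp, Ne.symm h]

theorem rcomp_none_cons (y : Int) (t : List Int) :
    rcomp none (y :: t) = y :: rcomp (some y) t := by
  simp [rcomp]

-- fold with append-at-end and last-element check computes rcomp
theorem foldl_rcomp (l : List Int) : ∀ acc : List Int,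
    l.foldl (fun rs s => if rs = [] ∨ rs.getLast? ≠ some s then rs ++ [s] else rs) acc
      = acc ++ rcomp acc.getLast? l := by
  induction l with
  | nil => intro acc; simp [rcomp]
  | cons s ss ih =>
    intro acc
    by_cases h : acc.getLast? = some s
    · have hacc : acc ≠ [] := by intro e; simp [e] at h
      have step : (if acc = [] ∨ acc.getLast? ≠ some s then acc ++ [s] else acc) = acc := by
        simp [hacc, h]
      rw [List.foldl_cons, step, ih acc, h]
      simp [rcomp]
    · have step : (if acc = [] ∨ acc.getLast? ≠ some s then acc ++ [s] else acc) = acc ++ [s] := by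
        simp [h]
      rw [List.foldl_cons, step, ih (acc ++ [s])]
      have hlast : (acc ++ [s]).getLast? = some s := by simp
      rw [hlast]
      cases hA : acc.getLast? with
      | none =>
        have hnil : acc = [] := by
          cases acc with
          | nil => rfl
          | cons a as => simp at hA
        simp [hnil, rcomp]
      | some k =>
        have hk : s ≠ k := by
          intro e; apply h; rw [hA, e]
        rw [rcomp_cons_ne k s ss hk]
        simp

-- B's zipped sign list is signsAux
theorem zip_signs (x : Int) (xs : List Int) :
    (((x :: xs).zip xs).map (fun ab => pvSgn ab.1 ab.2)) = signsAux x xs := by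
  induction xs generalizing x with
  | nil => simp [signsAux]
  | cons y ys ih => simp [signsAux, ih y]

theorem signsAux_eq_nil (prev : Int) (l : List Int) : signsAux prev l = [] ↔ l = [] := by
  cases l <;> simp [signsAux]

-- the crux: the compressed sign list is [1, -1, 1] iff the three runs are nonempty and cover everything
theorem main_iff (x : Int) (xs : List Int) :
    (rcomp none (signsAux x xs) = [1, -1, 1]) ↔
      (0 < (consumeUp x xs).1 ∧
       0 < (consumeDown (consumeUp x xs).2.1 (consumeUp x xs).2.2).1 ∧
       0 < (consumeUp (consumeDown (consumeUp x xs).2.1 (consumeUp x xs).2.2).2.1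
              (consumeDown (consumeUp x xs).2.1 (consumeUp x xs).2.2).2.2).1 ∧
       (consumeUp (consumeDown (consumeUp x xs).2.1 (consumeUp x xs).2.2).2.1
          (consumeDown (consumeUp x xs).2.1 (consumeUp x xs).2.2).2.2).2.2 = []) := by
  set u := consumeUp x xs with hu
  set d := consumeDown u.2.1 u.2.2 with hd
  set v := consumeUp d.2.1 d.2.2 with hv
  have hs0 : signsAux x xs = List.replicate u.1 1 ++ signsAux u.2.1 u.2.2 := signsAux_up xs x
  have hs1 : signsAux u.2.1 u.2.2 = List.replicate d.1 (-1) ++ signsAux d.2.1 d.2.2 :=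
    signsAux_down u.2.2 u.2.1
  have hs2 : signsAux d.2.1 d.2.2 = List.replicate v.1 1 ++ signsAux v.2.1 v.2.2 :=
    signsAux_up d.2.2 d.2.1
  -- head facts
  have h1 : ∀ y ys, signsAux u.2.1 u.2.2 = y :: ys → y ≠ 1 := by
    intro y ys hy
    cases hrest : u.2.2 with
    | nil => rw [hrest] at hy; simp [signsAux] at hy
    | cons z zs =>
      have hz := consumeUp_head xs x z zs (by rw [← hu]; exact hrest)
      rw [← hu] at hz
      rw [hrest] at hy
      simp only [signsAux] at hy
      injection hy with h' _
      intro hcon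
      rw [← h'] at hcon
      simp only [pvSgn] at hcon
      split_ifs at hcon <;> omega
  have h2 : ∀ y ys, signsAux d.2.1 d.2.2 = y :: ys → y ≠ -1 := by
    intro y ys hy
    cases hrest : d.2.2 with
    | nil => rw [hrest] at hy; simp [signsAux] at hy
    | cons z zs =>
      have hz := consumeDown_head u.2.2 u.2.1 z zs (by rw [← hd]; exact hrest)
      rw [← hd] at hz
      rw [hrest] at hy
      simp only [signsAux] at hy
      injection hy with h' _
      intro hcon
      rw [← h'] at hcon
      simp only [pvSgn] at hcon
      split_ifs at hcon <;> omega
  have h3 : ∀ y ys, signsAux v.2.1 v.2.2 = y :: ys → y ≠ 1 := by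
    intro y ys hy
    cases hrest : v.2.2 with
    | nil => rw [hrest] at hy; simp [signsAux] at hy
    | cons z zs =>
      have hz := consumeUp_head d.2.2 d.2.1 z zs (by rw [← hv]; exact hrest)
      rw [← hv] at hz
      rw [hrest] at hy
      simp only [signsAux] at hy
      injection hy with h' _
      intro hcon
      rw [← h'] at hcon
      simp only [pvSgn] at hcon
      split_ifs at hcon <;> omega
  constructor
  · intro hmain
    have ha : 0 < u.1 := by
      by_contra hna
      have ha0 : u.1 = 0 := by omega
      rw [hs0, ha0] at hmain
      simp only [List.replicate_zero, List.nil_append] at hmain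
      cases hsi : signsAux u.2.1 u.2.2 with
      | nil => rw [hsi] at hmain; simp [rcomp] at hmain
      | cons y t =>
        rw [hsi, rcomp_none_cons, List.cons.injEq] at hmain
        exact h1 y t hsi hmain.1
    rw [hs0, rcomp_replicate u.1 ha 1 none (by simp)] at hmain
    have hmain1 : rcomp (some 1) (signsAux u.2.1 u.2.2) = [-1, 1] := by
      rw [List.cons.injEq] at hmain
      exact hmain.2
    have hb : 0 < d.1 := by
      by_contra hnb
      have hb0 : d.1 = 0 := by omega
      rw [hs1, hb0] at hmain1
      simp only [List.replicate_zero, List.nil_append] at hmain1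
      cases hsi : signsAux d.2.1 d.2.2 with
      | nil => rw [hsi] at hmain1; simp [rcomp] at hmain1
      | cons y t =>
        have hy1 : y ≠ 1 := by
          apply h1 y t
          rw [hs1, hb0]
          simpa using hsi
        rw [hsi, rcomp_cons_ne 1 y t hy1, List.cons.injEq] at hmain1
        exact h2 y t hsi hmain1.1
    rw [hs1, rcomp_replicate d.1 hb (-1) (some 1) (by simp)] at hmain1
    have hmain2 : rcomp (some (-1)) (signsAux d.2.1 d.2.2) = [1] := by
      rw [List.cons.injEq] at hmain1
      exact hmain1.2
    have hc : 0 < v.1 := by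
      by_contra hnc
      have hc0 : v.1 = 0 := by omega
      rw [hs2, hc0] at hmain2
      simp only [List.replicate_zero, List.nil_append] at hmain2
      cases hsi : signsAux v.2.1 v.2.2 with
      | nil => rw [hsi] at hmain2; simp [rcomp] at hmain2
      | cons y t =>
        have hy2 : y ≠ -1 := by
          apply h2 y t
          rw [hs2, hc0]
          simpa using hsi
        rw [hsi, rcomp_cons_ne (-1) y t hy2, List.cons.injEq] at hmain2
        exact h3 y t hsi hmain2.1
    rw [hs2, rcomp_replicate v.1 hc 1 (some (-1)) (by simp)] at hmain2
    have hmain3 : rcomp (some 1) (signsAux v.2.1 v.2.2) = [] := by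
      rw [List.cons.injEq] at hmain2
      exact hmain2.2
    have hrest : v.2.2 = [] := by
      by_contra hne
      cases hsi : signsAux v.2.1 v.2.2 with
      | nil => exact hne ((signsAux_eq_nil v.2.1 v.2.2).mp hsi)
      | cons y t =>
        have hy3 : y ≠ 1 := h3 y t hsi
        rw [hsi, rcomp_cons_ne 1 y t hy3] at hmain3
        simp at hmain3
    exact ⟨ha, hb, hc, hrest⟩
  · rintro ⟨ha, hb, hc, hrest⟩
    have hsi3 : signsAux v.2.1 v.2.2 = [] := by rw [hrest]; rfl
    rw [hs0, hs1, hs2, hsi3]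
    rw [rcomp_replicate u.1 ha 1 none (by simp)]
    rw [rcomp_replicate d.1 hb (-1) (some 1) (by simp)]
    rw [rcomp_replicate v.1 hc 1 (some (-1)) (by simp)]
    simp [rcomp]

-- ===== VERDICT (by name: the statement is the Claim_ definition above) =====
theorem isTrionic_spec : Claim_equal_isTrionic := by
  intro nums _ hpre
  unfold Spec_isTrionic
  cases nums with
  | nil => exact absurd rfl hpre
  | cons x xs =>
    set u := consumeUp x xs with hu
    set d := consumeDown u.2.1 u.2.2 with hd
    set v := consumeUp d.2.1 d.2.2 with hv
    have hrest_u : u.2.2 = xs.drop u.1 := by rw [hu]; exact consumeUp_rest xs x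
    have hrest_d : d.2.2 = u.2.2.drop d.1 := by rw [hd]; exact consumeDown_rest u.2.2 u.2.1
    have hrest_v : v.2.2 = d.2.2.drop v.1 := by rw [hv]; exact consumeUp_rest d.2.2 d.2.1
    have hlen_u : u.1 ≤ xs.length := by rw [hu]; exact consumeUp_len_le xs x
    have hlen_d : d.1 ≤ u.2.2.length := by rw [hd]; exact consumeDown_len_le u.2.2 u.2.1
    have hlen_v : v.1 ≤ d.2.2.length := by rw [hv]; exact consumeUp_len_le d.2.2 d.2.1
    have hlu : u.2.2.length = xs.length - u.1 := by rw [hrest_u]; simp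
    have hld : d.2.2.length = u.2.2.length - d.1 := by rw [hrest_d]; simp
    have hveq : (v.2.2 = []) ↔ d.2.2.length ≤ v.1 := by
      rw [hrest_v]; exact List.drop_eq_nil_iff
    have hdrop2 : (x :: xs).drop (1 + u.1) = u.2.2 := by
      rw [hrest_u, Nat.add_comm, List.drop_succ_cons]
    have hdrop3 : (x :: xs).drop (1 + u.1 + d.1) = d.2.2 := by
      rw [hrest_d, hrest_u, List.drop_drop]
      rw [show 1 + u.1 + d.1 = (u.1 + d.1) + 1 from by omega, List.drop_succ_cons]
    simp only [isTrionic, isTrionic_alt, List.headD_cons, List.tail_cons, decide_eq_decide]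
    rw [zip_signs, foldl_rcomp]
    simp only [List.getLast?_nil, List.nil_append]
    rw [main_iff x xs, ← hu, ← hd, ← hv]
    simp only [whileGt_eq, whileLt_eq, List.drop_succ_cons, List.drop_zero, List.length_cons]
    rw [← hu, hdrop2, ← hd, hdrop3, ← hv]
    constructor
    · rintro ⟨c1, c2, c3, c4⟩
      exact ⟨by omega, by omega, by omega, by rw [hveq]; omega⟩
    · rintro ⟨c1, c2, c3, c4⟩
      rw [hveq] at c4
      exact ⟨by omega, by omega, by omega, by omega⟩
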